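-- pv_equiv track=rewrite | github.com/Ahanaf-M/PDF_modification_to_print | pdf modification for printing.py | make_series
-- ===== SOURCE A (Python) =====
-- def make_series(n):
--     series = []
--     for i in range(n):
--         if i % 4 == 0 or i % 4 == 3:
--             series.append(i)
--         elif i % 4 == 1:
--             series.append(i + 1)
--         else:
--             series.append(i - 1)
--     return series
-- ===== SOURCE B (Python) =====
-- def make_series(n):
--     out = []
--     base = 0
--     while base < n:
--         out.extend([base, base + 2, base + 1, base + 3][:n - base])
--         base += 4
--     return out
-- ===== Notes on version B (the rewrite author's own statement) =====
-- stated objective: alternative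
-- what changed: Replaces the per-index loop with a mod-4 branch by a loop over blocks of four, extending the output with the fixed swapped-middle template [base, base+2, base+1, base+3] truncated to n-base at the final partial block.
import Mathlib
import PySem

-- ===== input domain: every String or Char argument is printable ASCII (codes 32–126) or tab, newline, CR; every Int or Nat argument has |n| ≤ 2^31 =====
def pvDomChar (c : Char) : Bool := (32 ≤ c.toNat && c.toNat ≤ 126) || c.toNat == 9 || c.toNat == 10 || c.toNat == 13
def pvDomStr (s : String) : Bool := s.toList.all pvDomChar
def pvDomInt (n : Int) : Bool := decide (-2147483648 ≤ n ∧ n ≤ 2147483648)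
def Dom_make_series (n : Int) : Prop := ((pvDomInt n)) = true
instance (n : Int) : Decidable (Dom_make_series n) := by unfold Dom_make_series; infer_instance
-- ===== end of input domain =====

-- B replaces the per-index mod-4 branching loop by a block-of-four loop extending a fixed
-- swapped-middle template, truncated at the final partial block (objective: alternative).

-- ===== PORT A =====
def make_series (n : Int) : List Int :=
  (PySem.List.pyRange 0 n 1).foldl (fun series i =>
    if PySem.Int.mod i 4 = 0 ∨ PySem.Int.mod i 4 = 3 then series ++ [i]
    else if PySem.Int.mod i 4 = 1 then series ++ [i + 1]
    else series ++ [i - 1]) []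

-- ===== PORT B =====
-- the slice [base, base+2, base+1, base+3][:n-base] (n-base > 0 inside the loop) is List.take
def make_series_altLoop (n base : Int) (out : List Int) : List Int :=
  if base < n then
    make_series_altLoop n (base + 4) (out ++ ([base, base + 2, base + 1, base + 3].take (n - base).toNat))
  else out
termination_by (n - base).toNat
decreasing_by omega

def make_series_alt (n : Int) : List Int := make_series_altLoop n 0 []

-- ===== PRECONDITION & SPEC =====
def Spec_make_series (n : Int) (out : List Int) : Prop := out = make_series_alt n
instance (n : Int) (out : List Int) : Decidable (Spec_make_series n out) := by unfold Spec_make_series; infer_instance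

-- ===== CLAIM (what is proved, stated in full; the proofs are below) =====
def Claim_equal_make_series : Prop := ∀ (n : Int), Dom_make_series n → Spec_make_series n (make_series n)

-- ===== LEMMAS AND PROOFS =====

-- the per-index value A appends
def msVal (i : Int) : Int :=
  if PySem.Int.mod i 4 = 0 ∨ PySem.Int.mod i 4 = 3 then i
  else if PySem.Int.mod i 4 = 1 then i + 1
  else i - 1

lemma make_series_eq_map (n : Int) :
    make_series n = (PySem.List.pyRange 0 n 1).map msVal := by
  unfold make_series
  have hbody : ∀ (acc : List Int) (i : Int),
      (if PySem.Int.mod i 4 = 0 ∨ PySem.Int.mod i 4 = 3 then acc ++ [i]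
       else if PySem.Int.mod i 4 = 1 then acc ++ [i + 1]
       else acc ++ [i - 1]) = acc ++ [msVal i] := by
    intro acc i
    unfold msVal
    split_ifs <;> rfl
  simp only [hbody]
  simpa using PySem.List.foldl_append_singleton_eq_map (f := msVal)
    (l := PySem.List.pyRange 0 n 1) (acc := [])

lemma msVal_mod (i : Int) :
    msVal i = if i % 4 = 0 ∨ i % 4 = 3 then i else if i % 4 = 1 then i + 1 else i - 1 := by
  unfold msVal
  rw [PySem.Int.mod_eq_emod_of_pos (a := i) (b := 4) (by norm_num)]

lemma msLoop_key (k : Nat) : ∀ (n base : Int) (out : List Int), 0 ≤ base → base % 4 = 0 →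
    (n - base).toNat ≤ k →
    make_series_altLoop n base out = out ++ (PySem.List.pyRange base n 1).map msVal := by
  induction k with
  | zero =>
    intro n base out hb hm hk
    have hnb : n ≤ base := by omega
    rw [make_series_altLoop, if_neg (by omega), PySem.List.pyRange_one_eq_nil hnb]
    simp
  | succ k ih =>
    intro n base out hb hm hk
    by_cases hlt : base < n
    · rw [make_series_altLoop, if_pos hlt]
      have hmods : (base) % 4 = 0 ∧ (base+1) % 4 = 1 ∧ (base+2) % 4 = 2 ∧ (base+3) % 4 = 3 := by
        omega
      by_cases h4 : base + 4 ≤ n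
      · -- full block
        have htake : ([base, base + 2, base + 1, base + 3].take (n - base).toNat)
            = [base, base + 2, base + 1, base + 3] := by
          apply List.take_of_length_le; simp; omega
        rw [htake, ih n (base + 4) _ (by omega) (by omega) (by omega)]
        have hsplit : PySem.List.pyRange base n 1
            = PySem.List.pyRange base (base + 4) 1 ++ PySem.List.pyRange (base + 4) n 1 :=
          PySem.List.pyRange_one_append base (base + 4) n (by omega) h4
        have h1 : PySem.List.pyRange base (base + 4) 1 = [base, base + 1, base + 2, base + 3] := by
          rw [PySem.List.pyRange_one_cons (by omega), PySem.List.pyRange_one_cons (by omega),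
              PySem.List.pyRange_one_cons (by omega)]
          rw [show base + 4 = (base + 1 + 1 + 1) + 1 by ring, PySem.List.pyRange_one_singleton]
          norm_num
          omega
        rw [hsplit, List.map_append, h1]
        simp only [List.map_cons, List.map_nil, List.append_assoc]
        congr 1
        simp only [msVal_mod base, msVal_mod (base+1),
          msVal_mod (base+2), msVal_mod (base+3)]
        rw [if_pos (Or.inl hmods.1), if_neg (by omega), if_pos hmods.2.1,
          if_neg (by omega), if_neg (by omega), if_pos (Or.inr hmods.2.2.2)]
        norm_num
        omega
      · -- final partial block: 1 ≤ n - base ≤ 3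
        rw [make_series_altLoop, if_neg (by omega)]
        have hsv0 : msVal base = base := by
          rw [msVal_mod base, if_pos (Or.inl hmods.1)]
        have hsv1 : msVal (base + 1) = base + 2 := by
          rw [msVal_mod (base+1), if_neg (by omega), if_pos hmods.2.1]; ring
        have hsv2 : msVal (base + 2) = base + 1 := by
          rw [msVal_mod (base+2), if_neg (by omega), if_neg (by omega)]; ring
        have hn3 : n = base + 1 ∨ n = base + 2 ∨ n = base + 3 := by omega
        rcases hn3 with hn | hn | hn <;> subst hn
        · rw [show ((base + 1 - base).toNat) = 1 by omega,
            PySem.List.pyRange_one_cons (by omega : base < base + 1),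
            PySem.List.pyRange_one_eq_nil (by omega : base + 1 ≤ base + 1)]
          simp [hsv0]
        · rw [show ((base + 2 - base).toNat) = 2 by omega,
            PySem.List.pyRange_one_cons (by omega : base < base + 2),
            PySem.List.pyRange_one_cons (by omega : base + 1 < base + 2),
            PySem.List.pyRange_one_eq_nil (by omega : base + 2 ≤ base + 1 + 1)]
          simp [hsv0, hsv1]
        · rw [show ((base + 3 - base).toNat) = 3 by omega,
            PySem.List.pyRange_one_cons (by omega : base < base + 3),
            PySem.List.pyRange_one_cons (by omega : base + 1 < base + 3),
            PySem.List.pyRange_one_cons (by omega : base + 1 + 1 < base + 3),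
            PySem.List.pyRange_one_eq_nil (by omega : base + 3 ≤ base + 1 + 1 + 1)]
          simp [hsv0, hsv1]
          rw [show base + 1 + 1 = base + 2 by ring, hsv2]
    · rw [make_series_altLoop, if_neg hlt, PySem.List.pyRange_one_eq_nil (by omega)]
      simp

-- ===== VERDICT (by name: the statement is the Claim_ definition above) =====
theorem make_series_spec : Claim_equal_make_series := by
  intro n _
  unfold Spec_make_series make_series_alt
  rw [make_series_eq_map, msLoop_key (n - 0).toNat n 0 [] le_rfl (by norm_num) le_rfl]
  simp
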